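-- pv_equiv track=rewrite | github.com/Garrodes/Python | exos.py | moins_lettre
-- ===== SOURCE A (Python) =====
-- def moins_lettre(c,a):
--   premiere_trouvee = False
--   res = ''
--   for d in c:
--     if d != a:
--       res = res + d
--     elif not premiere_trouvee:
--       premiere_trouvee = True
--     else:
--       res = res + d
--   if premiere_trouvee:
--     return res
--   else:
--     return None
-- ===== SOURCE B (Python) =====
-- def moins_lettre(c, a):
--     i = next((j for j, d in enumerate(c) if d == a), -1)
--     if i == -1:
--         return None
--     return c[:i] + c[i+1:]
-- ===== Notes on version B (the rewrite author's own statement) =====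
-- stated objective: simpler
-- what changed: Replaces A's char-by-char accumulating rebuild with a boolean flag by a locate-the-first-matching-index search followed by two slices.
import Mathlib
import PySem

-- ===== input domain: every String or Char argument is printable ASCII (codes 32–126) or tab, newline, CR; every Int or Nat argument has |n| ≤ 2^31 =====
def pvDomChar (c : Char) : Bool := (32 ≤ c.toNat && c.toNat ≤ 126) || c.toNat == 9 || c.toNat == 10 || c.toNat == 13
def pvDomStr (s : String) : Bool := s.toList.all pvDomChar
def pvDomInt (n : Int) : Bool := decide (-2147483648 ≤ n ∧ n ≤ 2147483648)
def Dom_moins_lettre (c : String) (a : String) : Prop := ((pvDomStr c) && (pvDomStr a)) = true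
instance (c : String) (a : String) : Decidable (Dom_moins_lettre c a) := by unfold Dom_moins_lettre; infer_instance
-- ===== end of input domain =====

-- B replaces A's flagged char-by-char accumulating rebuild by a locate-first-index-then-slice decomposition (objective: simpler).


-- ===== PORT A =====
-- loop body: `if d != a: res += d  elif not premiere_trouvee: premiere_trouvee = True  else: res += d`
-- (`d != a` for the 1-char string d is `[d] ≠ a.toList`)
def moinsLettreStep (a : String) (st : Bool × List Char) (d : Char) : Bool × List Char :=
  if [d] ≠ a.toList then (st.1, st.2 ++ [d])
  else if st.1 = false then (true, st.2)
  else (st.1, st.2 ++ [d])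

def moins_lettre (c : String) (a : String) : Option String :=
  let st := c.toList.foldl (moinsLettreStep a) (false, [])
  if st.1 then some (String.mk st.2) else none

-- ===== PORT B =====
-- `next((j for j, d in enumerate(c) if d == a), -1)`, as an Option-valued index search
def locateFirst (a : String) : List Char → Option Nat
  | [] => none
  | d :: t => if [d] = a.toList then some 0 else (locateFirst a t).map (· + 1)

def moins_lettre_alt (c : String) (a : String) : Option String :=
  match locateFirst a c.toList with
  | none => none
  | some i => some (String.mk (c.toList.take i ++ c.toList.drop (i + 1)))

-- ===== PRECONDITION & SPEC =====
def Spec_moins_lettre (c : String) (a : String) (out : Option String) : Prop := out = moins_lettre_alt c a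
instance (c : String) (a : String) (out : Option String) : Decidable (Spec_moins_lettre c a out) := by unfold Spec_moins_lettre; infer_instance

-- ===== CLAIM (what is proved, stated in full; the proofs are below) =====
def Claim_equal_moins_lettre : Prop := ∀ (c : String) (a : String), Dom_moins_lettre c a → Spec_moins_lettre c a (moins_lettre c a)

-- ===== LEMMAS AND PROOFS =====
-- once the flag is true every branch appends d, so phase 2 just appends the rest
theorem foldl_step_true (a : String) (l : List Char) (r : List Char) :
    l.foldl (moinsLettreStep a) (true, r) = (true, r ++ l) := by
  induction l generalizing r with
  | nil => simp
  | cons d t ih =>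
    simp only [List.foldl_cons, moinsLettreStep]
    split
    · rw [ih]; simp
    · simp only [if_neg (by simp : ¬ (true = false))]; rw [ih]; simp

-- phase 1 characterisation: before a match the fold copies, at the first match it flips the flag
theorem foldl_step_false (a : String) (l : List Char) (r : List Char) :
    l.foldl (moinsLettreStep a) (false, r) =
      match locateFirst a l with
      | none => (false, r ++ l)
      | some i => (true, r ++ (l.take i ++ l.drop (i + 1))) := by
  induction l generalizing r with
  | nil => simp [locateFirst]
  | cons d t ih =>
    simp only [List.foldl_cons, locateFirst]
    by_cases h : [d] = a.toList
    · simp [moinsLettreStep, h, foldl_step_true]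
    · simp only [moinsLettreStep, if_pos (by simpa using h), ih]
      cases hl : locateFirst a t with
      | none => simp [h]
      | some i => simp [h]

-- ===== VERDICT (by name: the statement is the Claim_ definition above) =====
theorem moins_lettre_spec : Claim_equal_moins_lettre := by
  intro c a _
  show moins_lettre c a = moins_lettre_alt c a
  unfold moins_lettre moins_lettre_alt
  rw [foldl_step_false]
  cases h : locateFirst a c.toList with
  | none => simp
  | some i => simp
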